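-- pv_equiv track=rewrite | github.com/Yang-Ryan/Scrabble-AI-Agent | utils.py | is_rack_stuck
-- ===== SOURCE A (Python) =====
-- from typing import List, Dict, Set, Tuple, Optional
--
-- def is_rack_stuck(rack: List[str], dictionary: Set[str],
--                  board: List[List[Optional[str]]]) -> bool:
--     """
--     Check if rack is "stuck" (cannot form any valid words)
--     Simplified version - in reality would check against board constraints
--
--     Args:
--         rack: Current rack
--         dictionary: Valid words
--         board: Current board state
--
--     Returns:
--         True if rack appears stuck
--     """
--     if not rack:
--         return True
--
--     # Check if any 2-3 letter words can be formed
--     for word in dictionary: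
--         if 2 <= len(word) <= 3:
--             if can_form_word_from_rack(word, rack):
--                 return False
--
--     return True
--
-- def can_form_word_from_rack(word: str, rack: List[str]) -> bool:
--     """
--     Check if word can be formed from tiles in rack
--
--     Args:
--         word: Word to check
--         rack: Available tiles
--
--     Returns:
--         True if word can be formed
--     """
--     available = rack.copy()
--
--     for letter in word.upper():
--         if letter in available:
--             available.remove(letter)
--         elif '?' in available:  # Use blank tile
--             available.remove('?')
--         else:
--             return False
--
--     return True
-- ===== SOURCE B (Python) =====
-- def is_rack_stuck(rack, dictionary, board):
--     if not rack:
--         return True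
--     # Tally the rack once: blank count + a multiset of the other tiles.
--     blanks = 0
--     counts = {}
--     for tile in rack:
--         if tile == '?':
--             blanks += 1
--         else:
--             counts[tile] = counts.get(tile, 0) + 1
--     # A word is formable iff its total letter shortfall fits in the blanks.
--     for word in dictionary:
--         if 2 <= len(word) <= 3:
--             w = word.upper()
--             needed = 0
--             for ch in set(w):
--                 needed += max(0, w.count(ch) - counts.get(ch, 0))
--             if needed <= blanks:
--                 return False
--     return True
-- ===== Notes on version B (the rewrite author's own statement) =====
-- stated objective: faster
-- what changed: B tallies the rack once into a blank count plus a tile-count map and tests each 2-3 letter word by a closed-form letter-shortfall sum (sum of max(0, word count - rack count) <= blanks), instead of A's per-word greedy simulation that copies the rack and does membership/remove scans for every letter.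
import Mathlib
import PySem

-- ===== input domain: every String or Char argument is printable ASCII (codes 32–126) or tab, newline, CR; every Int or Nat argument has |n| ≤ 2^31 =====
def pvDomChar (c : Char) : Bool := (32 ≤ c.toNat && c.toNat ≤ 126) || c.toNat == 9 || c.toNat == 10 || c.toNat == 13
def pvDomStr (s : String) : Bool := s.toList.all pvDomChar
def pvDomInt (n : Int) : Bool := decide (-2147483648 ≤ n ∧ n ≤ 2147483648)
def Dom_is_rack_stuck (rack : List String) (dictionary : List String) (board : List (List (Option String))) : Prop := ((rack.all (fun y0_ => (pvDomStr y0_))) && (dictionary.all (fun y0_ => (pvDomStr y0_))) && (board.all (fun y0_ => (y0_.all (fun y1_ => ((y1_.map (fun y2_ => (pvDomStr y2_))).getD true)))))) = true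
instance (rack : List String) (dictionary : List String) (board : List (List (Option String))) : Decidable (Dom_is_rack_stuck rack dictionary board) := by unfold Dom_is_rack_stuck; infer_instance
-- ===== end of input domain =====

-- B replaces A's per-word greedy rack simulation (rack copy + membership/remove scans per letter)
-- by a one-time tally of the rack and a per-word letter-shortfall count; objective: faster.

-- a single Python character as a 1-character string (letters of `word` are compared to rack tiles)
def pvChr (c : Char) : String := String.ofList [c]

-- ===== PORT A =====
-- the `for letter in word.upper()` loop of can_form_word_from_rack
def pvCanFormLoop : List Char → List String → Bool
  | [], _ => true
  | c :: rest, avail =>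
    if pvChr c ∈ avail then
      pvCanFormLoop rest ((PySem.List.remove? avail (pvChr c)).getD avail)
    else if "?" ∈ avail then
      pvCanFormLoop rest ((PySem.List.remove? avail "?").getD avail)
    else false

def can_form_word_from_rack (word : String) (rack : List String) : Bool :=
  pvCanFormLoop (PySem.Str.upper word).toList rack

-- the `for word in dictionary` loop with its early `return False`
def pvALoop (rack : List String) : List String → Bool
  | [] => true
  | w :: rest =>
    if 2 ≤ PySem.Str.len w ∧ PySem.Str.len w ≤ 3 then
      if can_form_word_from_rack w rack then false else pvALoop rack rest
    else pvALoop rack rest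

def is_rack_stuck (rack : List String) (dictionary : List String) (_board : List (List (Option String))) : Bool :=
  if rack = [] then true
  else pvALoop rack dictionary

-- ===== PORT B =====
-- one pass over the rack: state (blanks, counts)
def pvTallyStep (st : Int × PySem.Dict String Int) (tile : String) : Int × PySem.Dict String Int :=
  if tile = "?" then (st.1 + 1, st.2)
  else (st.1, st.2.insert tile (st.2.getD tile 0 + 1))

-- per-word shortfall test: sum over set(w) of max(0, w.count(ch) - counts.get(ch, 0)) ≤ blanks
def pvFits (counts : PySem.Dict String Int) (blanks : Int) (word : String) : Bool :=
  let cs := (PySem.Str.upper word).toList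
  let needed := (PySem.Set.ofList cs).foldl
    (fun acc ch => acc + max 0 ((cs.count ch : Int) - counts.getD (pvChr ch) 0)) 0
  decide (needed ≤ blanks)

def pvBLoop (counts : PySem.Dict String Int) (blanks : Int) : List String → Bool
  | [] => true
  | w :: rest =>
    if 2 ≤ PySem.Str.len w ∧ PySem.Str.len w ≤ 3 then
      if pvFits counts blanks w then false else pvBLoop counts blanks rest
    else pvBLoop counts blanks rest

def is_rack_stuck_alt (rack : List String) (dictionary : List String) (_board : List (List (Option String))) : Bool :=
  if rack = [] then true
  else
    let st := rack.foldl pvTallyStep (0, PySem.Dict.empty)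
    pvBLoop st.2 st.1 dictionary

-- ===== PRECONDITION & SPEC =====
def Spec_is_rack_stuck (rack : List String) (dictionary : List String) (board : List (List (Option String))) (out : Bool) : Prop := out = is_rack_stuck_alt rack dictionary board
instance (rack : List String) (dictionary : List String) (board : List (List (Option String))) (out : Bool) : Decidable (Spec_is_rack_stuck rack dictionary board out) := by unfold Spec_is_rack_stuck; infer_instance

-- ===== CLAIM (what is proved, stated in full; the proofs are below) =====
def Claim_equal_is_rack_stuck : Prop := ∀ (rack : List String) (dictionary : List String) (board : List (List (Option String))), Dom_is_rack_stuck rack dictionary board → Spec_is_rack_stuck rack dictionary board (is_rack_stuck rack dictionary board)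

-- ===== LEMMAS AND PROOFS =====

-- number of blanks A's greedy loop consumes: letters not matched by the non-blank pool
def pvNeed : List Char → List String → Nat
  | [], _ => 0
  | c :: rest, pool =>
    if pvChr c ∈ pool then pvNeed rest (pool.erase (pvChr c)) else pvNeed rest pool + 1

theorem pvChr_inj {a b : Char} (h : pvChr a = pvChr b) : a = b := by
  have := congrArg String.toList h
  simpa [pvChr] using this

-- A's greedy loop succeeds iff the blanks of `avail` cover the shortfall against its non-blank tiles
theorem pvCanFormLoop_eq (cs : List Char) : ∀ (avail : List String),
    pvCanFormLoop cs avail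
      = decide (pvNeed cs (avail.filter (fun t => t ≠ "?")) ≤ avail.count "?") := by
  induction cs with
  | nil => intro avail; simp [pvCanFormLoop, pvNeed]
  | cons c rest ih =>
    intro avail
    by_cases hmem : pvChr c ∈ avail
    · rw [pvCanFormLoop]
      rw [if_pos hmem, PySem.List.remove?_eq_some_erase avail _ hmem, Option.getD_some, ih]
      by_cases hq : pvChr c = "?"
      · -- the letter '?' matched a blank tile: pool unchanged, blank count drops by one
        have hpool : (avail.erase (pvChr c)).filter (fun t => t ≠ "?")
            = avail.filter (fun t => t ≠ "?") := by
          rw [← List.erase_filter]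
          apply List.erase_of_not_mem
          simp [hq]
        have hcnt : (avail.erase (pvChr c)).count "?" = avail.count "?" - 1 := by
          rw [hq]; exact List.count_erase_self ..
        have hnot : pvChr c ∉ avail.filter (fun t => t ≠ "?") := by simp [hq]
        have hpos : 1 ≤ avail.count "?" := by
          rw [← hq]; exact List.one_le_count_iff.mpr hmem
        rw [hpool, hcnt, pvNeed, if_neg hnot]
        simp only [decide_eq_decide]
        omega
      · -- an ordinary letter matched: erase it from the pool
        have hinf : pvChr c ∈ avail.filter (fun t => t ≠ "?") := by
          simp [List.mem_filter, hmem, hq]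
        have hpool : (avail.erase (pvChr c)).filter (fun t => t ≠ "?")
            = (avail.filter (fun t => t ≠ "?")).erase (pvChr c) := (List.erase_filter).symm
        have hcnt : (avail.erase (pvChr c)).count "?" = avail.count "?" :=
          List.count_erase_of_ne (fun h => hq h.symm)
        rw [hpool, hcnt, pvNeed, if_pos hinf]
    · rw [pvCanFormLoop, if_neg hmem]
      have hnot : pvChr c ∉ avail.filter (fun t => t ≠ "?") := by
        simp only [List.mem_filter]; tauto
      by_cases hbq : "?" ∈ avail
      · rw [if_pos hbq, PySem.List.remove?_eq_some_erase avail _ hbq, Option.getD_some, ih]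
        have hpool : (avail.erase "?").filter (fun t => t ≠ "?")
            = avail.filter (fun t => t ≠ "?") := by
          rw [← List.erase_filter]
          apply List.erase_of_not_mem; simp
        have hcnt : (avail.erase "?").count "?" = avail.count "?" - 1 :=
          List.count_erase_self ..
        have hpos : 1 ≤ avail.count "?" := List.one_le_count_iff.mpr hbq
        rw [hpool, hcnt, pvNeed, if_neg hnot]
        simp only [decide_eq_decide]
        omega
      · rw [if_neg hbq]
        have hz : avail.count "?" = 0 := List.count_eq_zero.mpr hbq
        rw [pvNeed, if_neg hnot, hz]
        simp

-- the dedup-sum of truncated letter shortfalls computes pvNeed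
theorem pvNeed_eq_sum (cs : List Char) : ∀ (pool : List String),
    ∑ ch ∈ cs.toFinset, (cs.count ch - pool.count (pvChr ch)) = pvNeed cs pool := by
  induction cs with
  | nil => intro pool; simp [pvNeed]
  | cons c rest ih =>
    intro pool
    rw [pvNeed, List.toFinset_cons]
    by_cases hmem : pvChr c ∈ pool
    · rw [if_pos hmem, ← ih (pool.erase (pvChr c))]
      have hpos : 1 ≤ pool.count (pvChr c) := List.one_le_count_iff.mpr hmem
      have hterm : ∀ ch, ch ≠ c →
          (c :: rest).count ch - pool.count (pvChr ch)
            = rest.count ch - (pool.erase (pvChr c)).count (pvChr ch) := by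
        intro ch hne
        rw [List.count_erase_of_ne (fun h => hne (pvChr_inj h.symm).symm)]
        rw [List.count_cons, if_neg (fun h => hne (eq_comm.mp (beq_iff_eq.mp h))), Nat.add_zero]
      by_cases hc : c ∈ rest.toFinset
      · rw [Finset.insert_eq_self.mpr hc]
        rw [← Finset.add_sum_erase _ _ hc,
            ← Finset.add_sum_erase _ (fun ch => rest.count ch - (pool.erase (pvChr c)).count (pvChr ch)) hc]
        have h1 : (c :: rest).count c - pool.count (pvChr c)
            = rest.count c - (pool.erase (pvChr c)).count (pvChr c) := by
          rw [List.count_cons_self, List.count_erase_self]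
          omega
        rw [h1, Finset.sum_congr rfl (fun ch hch => hterm ch (Finset.mem_erase.mp hch).1)]
      · rw [Finset.sum_insert hc]
        have h0 : rest.count c = 0 := List.count_eq_zero.mpr (by simpa using hc)
        have h1 : (c :: rest).count c - pool.count (pvChr c) = 0 := by
          rw [List.count_cons_self, h0]; omega
        rw [h1, Finset.sum_congr rfl (fun ch hch => hterm ch (fun h => hc (h ▸ hch)))]
        omega
    · rw [if_neg hmem, ← ih pool]
      have h0 : pool.count (pvChr c) = 0 := List.count_eq_zero.mpr hmem
      have hterm : ∀ ch, ch ≠ c →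
          (c :: rest).count ch - pool.count (pvChr ch)
            = rest.count ch - pool.count (pvChr ch) := by
        intro ch hne
        rw [List.count_cons, if_neg (fun h => hne (eq_comm.mp (beq_iff_eq.mp h))), Nat.add_zero]
      by_cases hc : c ∈ rest.toFinset
      · rw [Finset.insert_eq_self.mpr hc]
        rw [← Finset.add_sum_erase _ _ hc,
            ← Finset.add_sum_erase _ (fun ch => rest.count ch - pool.count (pvChr ch)) hc]
        rw [Finset.sum_congr rfl (fun ch hch => hterm ch (Finset.mem_erase.mp hch).1),
            List.count_cons_self, h0]
        omega
      · rw [Finset.sum_insert hc]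
        have h00 : rest.count c = 0 := List.count_eq_zero.mpr (by simpa using hc)
        rw [Finset.sum_congr rfl (fun ch hch => hterm ch (fun h => hc (h ▸ hch))),
            List.count_cons_self, h0, h00]
        omega

-- the rack tally: blanks = count of "?", counts = counter of the other tiles
theorem pvTally_spec (rack : List String) : ∀ (b : Int) (d : PySem.Dict String Int),
    (rack.foldl pvTallyStep (b, d)).1 = b + rack.count "?"
    ∧ ∀ v, (rack.foldl pvTallyStep (b, d)).2.getD v 0
        = d.getD v 0 + (rack.filter (fun t => t ≠ "?")).count v := by
  induction rack with
  | nil => intro b d; simp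
  | cons tile rest ih =>
    intro b d
    rw [List.foldl_cons]
    by_cases ht : tile = "?"
    · have hstep : pvTallyStep (b, d) tile = (b + 1, d) := by simp [pvTallyStep, ht]
      rw [hstep]
      obtain ⟨h1, h2⟩ := ih (b + 1) d
      have hcnt : (tile :: rest).count "?" = rest.count "?" + 1 := by
        rw [List.count_cons, if_pos (by simp [ht])]
      have hfil : (tile :: rest).filter (fun t => t ≠ "?") = rest.filter (fun t => t ≠ "?") := by
        rw [List.filter_cons, if_neg (by simp [ht])]
      refine ⟨?_, ?_⟩
      · rw [h1, hcnt]; push_cast; ring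
      · intro v; rw [h2 v, hfil]
    · have hstep : pvTallyStep (b, d) tile = (b, d.insert tile (d.getD tile 0 + 1)) := by
        simp [pvTallyStep, ht]
      rw [hstep]
      obtain ⟨h1, h2⟩ := ih b (d.insert tile (d.getD tile 0 + 1))
      have hcnt : (tile :: rest).count "?" = rest.count "?" := by
        rw [List.count_cons, if_neg (fun h => ht (beq_iff_eq.mp h)), Nat.add_zero]
      have hfil : (tile :: rest).filter (fun t => t ≠ "?")
          = tile :: rest.filter (fun t => t ≠ "?") := by
        rw [List.filter_cons, if_pos (decide_eq_true ht)]
      refine ⟨?_, ?_⟩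
      · rw [h1, hcnt]
      · intro v
        rw [h2 v, PySem.Dict.getD_insert, hfil, List.count_cons]
        by_cases hv : v = tile
        · rw [if_pos hv, if_pos (by simp [hv]), hv]
          push_cast; ring
        · rw [if_neg hv, if_neg (fun h => hv (beq_iff_eq.mp h).symm), Nat.add_zero]

theorem pvSum_cast (l : List Char) (f : Char → ℕ) :
    ((l.map (fun ch => ((f ch : ℕ) : ℤ))).sum) = (((l.map f).sum : ℕ) : ℤ) := by
  induction l with
  | nil => simp
  | cons x xs ih => simp [ih]

-- per word: A's greedy test equals B's shortfall test against the tallied rack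
theorem pvWord_eq (rack : List String) (w : String) :
    can_form_word_from_rack w rack
      = pvFits (rack.foldl pvTallyStep (0, PySem.Dict.empty)).2
          (rack.foldl pvTallyStep (0, PySem.Dict.empty)).1 w := by
  obtain ⟨hb, hd⟩ := pvTally_spec rack 0 PySem.Dict.empty
  rw [can_form_word_from_rack, pvCanFormLoop_eq, pvFits]
  rw [PySem.List.foldl_add, hb]
  have hmap : ∀ ch, max 0 (((PySem.Str.upper w).toList.count ch : ℤ)
        - (rack.foldl pvTallyStep (0, PySem.Dict.empty)).2.getD (pvChr ch) 0)
      = ((((PySem.Str.upper w).toList.count ch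
          - (rack.filter (fun t => t ≠ "?")).count (pvChr ch) : ℕ)) : ℤ) := by
    intro ch
    rw [hd (pvChr ch), PySem.Dict.getD_empty]
    omega
  rw [List.map_congr_left (fun ch _ => hmap ch), pvSum_cast]
  have hfin : (PySem.Set.ofList (PySem.Str.upper w).toList).toFinset
      = (PySem.Str.upper w).toList.toFinset := by
    ext x; simp [PySem.Set.mem_ofList]
  have hsum : ((PySem.Set.ofList (PySem.Str.upper w).toList).map
        (fun ch => (PySem.Str.upper w).toList.count ch
          - (rack.filter (fun t => t ≠ "?")).count (pvChr ch))).sum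
      = pvNeed (PySem.Str.upper w).toList (rack.filter (fun t => t ≠ "?")) := by
    rw [← List.sum_toFinset _ (PySem.Set.nodup_ofList _), hfin,
        pvNeed_eq_sum]
  rw [hsum]
  simp only [decide_eq_decide]
  omega

theorem pvLoop_eq (rack : List String) (ds : List String) :
    pvALoop rack ds
      = pvBLoop (rack.foldl pvTallyStep (0, PySem.Dict.empty)).2
          (rack.foldl pvTallyStep (0, PySem.Dict.empty)).1 ds := by
  induction ds with
  | nil => rfl
  | cons w rest ih =>
    simp only [pvALoop, pvBLoop, pvWord_eq rack w, ih]

-- ===== VERDICT (by name: the statement is the Claim_ definition above) =====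
theorem is_rack_stuck_spec : Claim_equal_is_rack_stuck := by
  intro rack dictionary board _
  unfold Spec_is_rack_stuck is_rack_stuck is_rack_stuck_alt
  by_cases h : rack = []
  · simp [h]
  · simp only [h, if_false, pvLoop_eq]
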